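-- pv_equiv track=rewrite | github.com/LuisGC/advent-of-code | 2021/day-14/main.py | apply_insertion
-- ===== SOURCE A (Python) =====
-- from collections import Counter
--
-- def apply_insertion(template: str, rules: dict, steps: int) -> int:
--
--     for step in range(steps):
--         pairs = [template[i] + template[i + 1] for i in range(0, len(template) - 1)]
--         new = template[0]
--         for pair in pairs:
--             if pair in rules:
--                 new += rules[pair] + pair[1]
--             else:
--                 new += pair[1]
--         template = new
--
--     c = Counter(template)
--
--     return (max(c.values()) - min(c.values()))
-- ===== SOURCE B (Python) =====
-- from collections import Counter
--
-- def apply_insertion(template: str, rules: dict, steps: int) -> int: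
--     chars = Counter(template)
--     pairs = Counter(zip(template, template[1:]))
--     for _ in range(steps):
--         npairs = Counter()
--         for (a, b), n in pairs.items():
--             v = rules.get(a + b)
--             if v is None:
--                 npairs[(a, b)] += n
--             else:
--                 seg = a + v + b
--                 for q in zip(seg, seg[1:]):
--                     npairs[q] += n
--                 for ch in v:
--                     chars[ch] += n
--         pairs = npairs
--     return max(chars.values()) - min(chars.values())
-- ===== Notes on version B (the rewrite author's own statement) =====
-- stated objective: faster
-- what changed: Instead of materialising the exponentially growing polymer string each step, B keeps Counters of adjacent pairs and of characters and updates them per step, tallying the element counts directly.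
import Mathlib
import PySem

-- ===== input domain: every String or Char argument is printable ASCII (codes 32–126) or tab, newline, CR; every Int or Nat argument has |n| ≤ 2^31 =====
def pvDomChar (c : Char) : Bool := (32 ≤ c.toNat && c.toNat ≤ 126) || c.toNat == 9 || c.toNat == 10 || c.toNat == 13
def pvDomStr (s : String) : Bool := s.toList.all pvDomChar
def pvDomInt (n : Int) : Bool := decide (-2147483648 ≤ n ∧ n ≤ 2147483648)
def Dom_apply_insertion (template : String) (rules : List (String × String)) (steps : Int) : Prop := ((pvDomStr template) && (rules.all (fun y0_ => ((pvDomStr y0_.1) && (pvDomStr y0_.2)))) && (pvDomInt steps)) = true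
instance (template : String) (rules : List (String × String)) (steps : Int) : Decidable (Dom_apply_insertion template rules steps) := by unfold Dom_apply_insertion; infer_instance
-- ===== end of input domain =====

-- B replaces A's per-step rebuilding of the whole polymer string by counters of adjacent
-- pairs and of characters updated per step (objective: faster).

-- shared helper: Python dict lookup on the association list (first match)
def ruleGet? (rules : List (String × String)) (k : String) : Option String :=
  (rules.find? (fun p => p.1 == k)).map Prod.snd

-- ===== PORT A =====
-- one step of A's loop: rebuild the template (as List Char) pair by pair
def aStep (rules : List (String × String)) (t : List Char) : List Char :=
  let pairs := (PySem.List.pyRange 0 ((t.length : Int) - 1) 1).map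
      (fun i => ((PySem.List.pyGet? t i).getD ' ', (PySem.List.pyGet? t (i + 1)).getD ' '))
  let new := [(PySem.List.pyGet? t 0).getD ' ']
  pairs.foldl (fun new pr =>
    match ruleGet? rules (String.mk [pr.1, pr.2]) with
    | some v => new ++ v.toList ++ [pr.2]
    | none => new ++ [pr.2]) new

def apply_insertion (template : String) (rules : List (String × String)) (steps : Int) : Int :=
  let t := (PySem.List.pyRange 0 steps 1).foldl (fun t _ => aStep rules t) template.toList
  let c := PySem.Dict.counter t
  (PySem.List.max? c.values (fun x => x)).getD 0 - (PySem.List.min? c.values (fun x => x)).getD 0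

-- ===== PORT B =====
-- one step of B's loop: fold over the pair-counter items, rebuilding the pair counter
-- and bumping the character counter by the inserted characters
def bStep (rules : List (String × String))
    (st : PySem.Dict (Char × Char) Int × PySem.Dict Char Int) :
    PySem.Dict (Char × Char) Int × PySem.Dict Char Int :=
  st.1.items.foldl (fun acc it =>
    match ruleGet? rules (String.mk [it.1.1, it.1.2]) with
    | none => (acc.1.modify it.1 0 (· + it.2), acc.2)
    | some v =>
        let seg := it.1.1 :: v.toList ++ [it.1.2]
        ((seg.zip seg.tail).foldl (fun d q => d.modify q 0 (· + it.2)) acc.1,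
         v.toList.foldl (fun d ch => d.modify ch 0 (· + it.2)) acc.2))
    (PySem.Dict.empty, st.2)

def apply_insertion_alt (template : String) (rules : List (String × String)) (steps : Int) : Int :=
  let t := template.toList
  let chars := PySem.Dict.counter t
  let pairs := PySem.Dict.counter (t.zip (PySem.List.slice t (some 1) none))
  let fin := (PySem.List.pyRange 0 steps 1).foldl (fun st _ => bStep rules st) (pairs, chars)
  (PySem.List.max? fin.2.values (fun x => x)).getD 0 -
    (PySem.List.min? fin.2.values (fun x => x)).getD 0

-- ===== PRECONDITION & SPEC =====
-- Pre_ excludes only the empty template, on which A raises (IndexError/ValueError) and B raises ValueError.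
def Pre_apply_insertion (template : String) (rules : List (String × String)) (steps : Int) : Prop :=
  template.toList ≠ []
instance (template : String) (rules : List (String × String)) (steps : Int) : Decidable (Pre_apply_insertion template rules steps) := by unfold Pre_apply_insertion; infer_instance

def pvWitness_apply_insertion : String × (List (String × String)) × Int :=
  ("NNCB", [("NC", "B"), ("CB", "H")], 2)

def Spec_apply_insertion (template : String) (rules : List (String × String)) (steps : Int) (out : Int) : Prop := out = apply_insertion_alt template rules steps
instance (template : String) (rules : List (String × String)) (steps : Int) (out : Int) : Decidable (Spec_apply_insertion template rules steps out) := by unfold Spec_apply_insertion; infer_instance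

-- ===== CLAIM (what is proved, stated in full; the proofs are below) =====
def Claim_equal_apply_insertion : Prop := ∀ (template : String) (rules : List (String × String)) (steps : Int), Dom_apply_insertion template rules steps → Pre_apply_insertion template rules steps → Spec_apply_insertion template rules steps (apply_insertion template rules steps)

-- ===== LEMMAS AND PROOFS =====

-- the list of adjacent pairs of a string
def pairsOf (t : List Char) : List (Char × Char) := t.zip t.tail

-- the characters a rule inserts between pr.1 and pr.2 ([] if no rule matches)
def vOf (rules : List (String × String)) (pr : Char × Char) : List Char :=
  match ruleGet? rules (String.mk [pr.1, pr.2]) with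
  | some v => v.toList
  | none => []

-- what one pair expands to in A's new string, minus its first character
def expand (rules : List (String × String)) (pr : Char × Char) : List Char :=
  vOf rules pr ++ [pr.2]

-- the adjacent pairs of the expansion of one pair
def expPairs (rules : List (String × String)) (pr : Char × Char) : List (Char × Char) :=
  pairsOf (pr.1 :: expand rules pr)

-- the body of B's inner fold, named so the induction can speak about it
def bBody (rules : List (String × String))
    (acc : PySem.Dict (Char × Char) Int × PySem.Dict Char Int)
    (it : (Char × Char) × Int) :
    PySem.Dict (Char × Char) Int × PySem.Dict Char Int :=
  match ruleGet? rules (String.mk [it.1.1, it.1.2]) with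
  | none => (acc.1.modify it.1 0 (· + it.2), acc.2)
  | some v =>
      let seg := it.1.1 :: v.toList ++ [it.1.2]
      ((seg.zip seg.tail).foldl (fun d q => d.modify q 0 (· + it.2)) acc.1,
       v.toList.foldl (fun d ch => d.modify ch 0 (· + it.2)) acc.2)

-- the invariant tying B's two counters to A's current template
def BInv (rules : List (String × String)) (t : List Char)
    (st : PySem.Dict (Char × Char) Int × PySem.Dict Char Int) : Prop :=
  (∀ q, st.1.getD q 0 = ((pairsOf t).count q : Int)) ∧ st.1.keys.Nodup ∧
    (∀ q, q ∈ st.1.keys ↔ q ∈ pairsOf t) ∧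
  (∀ ch, st.2.getD ch 0 = (t.count ch : Int)) ∧ st.2.keys.Nodup ∧
    (∀ ch, ch ∈ st.2.keys ↔ ch ∈ t)

theorem pairs_map_eq (t : List Char) :
    (PySem.List.pyRange 0 ((t.length : Int) - 1) 1).map
      (fun i => ((PySem.List.pyGet? t i).getD ' ', (PySem.List.pyGet? t (i + 1)).getD ' ')) =
    pairsOf t := by
  cases t with
  | nil => rfl
  | cons a rest =>
    have h1 : (((a :: rest).length : Int)) - 1 = ((rest.length : Nat) : Int) := by
      simp
    rw [h1, PySem.List.pyRange_zero_natCast, List.map_map]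
    apply List.ext_getElem
    · simp [pairsOf]
    · intro i hi1 hi2
      have hcast : ((i : Int) + 1) = ((i + 1 : Nat) : Int) := by push_cast; ring
      simp only [List.getElem_map, List.getElem_range, Function.comp_apply, hcast,
        PySem.List.pyGet?_natCast, pairsOf, List.getElem_zip, List.getElem_tail]
      simp at hi1
      rw [List.getElem?_eq_getElem (by omega), List.getElem?_eq_getElem (by simp; omega)]
      simp

theorem aStep_eq (rules : List (String × String)) (a : Char) (rest : List Char) :
    aStep rules (a :: rest) = a :: (pairsOf (a :: rest)).flatMap (expand rules) := by
  unfold aStep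
  rw [pairs_map_eq]
  have hbody : (fun (new : List Char) (pr : Char × Char) =>
      match ruleGet? rules (String.mk [pr.1, pr.2]) with
      | some v => new ++ v.toList ++ [pr.2]
      | none => new ++ [pr.2]) = fun new pr => new ++ expand rules pr := by
    funext new pr
    cases h : ruleGet? rules (String.mk [pr.1, pr.2]) with
    | some v => simp [expand, vOf, h]
    | none => simp [expand, vOf, h]
  simp only [hbody, PySem.List.foldl_append_eq_flatMap]
  have h0 : PySem.List.pyGet? (a::rest) (0:Int) = some a := by simpa using PySem.List.pyGet?_natCast (a::rest) 0
  simp [h0]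

theorem pairsOf_cons_cons (a b : Char) (l : List Char) :
    pairsOf (a :: b :: l) = (a, b) :: pairsOf (b :: l) := rfl

theorem pairsOf_append_cons (l : List Char) (x : Char) (m : List Char) :
    pairsOf ((l ++ [x]) ++ m) = pairsOf (l ++ [x]) ++ pairsOf (x :: m) := by
  induction l with
  | nil => simp [pairsOf]
  | cons a l ih =>
    cases l with
    | nil => simp [pairsOf_cons_cons, pairsOf] at *
    | cons b l' =>
      simp only [List.cons_append, pairsOf_cons_cons] at *
      rw [ih]

theorem pairsOf_chain (rules : List (String × String)) (rest : List Char) (a : Char) :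
    pairsOf (a :: (pairsOf (a :: rest)).flatMap (expand rules)) =
      (pairsOf (a :: rest)).flatMap (expPairs rules) := by
  induction rest generalizing a with
  | nil => simp [pairsOf]
  | cons b rest' ih =>
    rw [pairsOf_cons_cons]
    simp only [List.flatMap_cons]
    have h1 : a :: (expand rules (a, b) ++ (pairsOf (b :: rest')).flatMap (expand rules)) =
        ((a :: vOf rules (a, b)) ++ [b]) ++ (pairsOf (b :: rest')).flatMap (expand rules) := by
      simp [expand]
    rw [h1, pairsOf_append_cons]
    rw [ih b]
    congr 1

theorem sum_count_singleton (l : List (Char × Char)) (ch : Char) :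
    (l.map (fun pr => ([pr.2] : List Char).count ch)).sum = (l.map Prod.snd).count ch := by
  induction l with
  | nil => simp
  | cons p l ih =>
    rw [List.map_cons, List.sum_cons, ih]
    conv_rhs => rw [List.map_cons, List.count_cons]
    have h2 : List.count ch [p.2] = if (p.2 == ch) = true then 1 else 0 := by
      rw [List.count_cons, List.count_nil]
      exact Nat.zero_add _
    rw [h2]
    exact Nat.add_comm _ _

theorem count_aStep_char (rules : List (String × String)) (a : Char) (rest : List Char) (ch : Char) :
    (aStep rules (a :: rest)).count ch =
      (a :: rest).count ch + ((pairsOf (a :: rest)).map (fun pr => (vOf rules pr).count ch)).sum := by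
  rw [aStep_eq]
  have htail : (pairsOf (a :: rest)).map Prod.snd = rest := by
    simp [pairsOf, List.map_snd_zip]
  have hexp : ∀ pr : Char × Char, (expand rules pr).count ch =
      (vOf rules pr).count ch + ([pr.2] : List Char).count ch := by
    intro pr; simp [expand, List.count_append]
  have h1 : ((pairsOf (a :: rest)).map (fun pr => (expand rules pr).count ch)).sum
      = ((pairsOf (a :: rest)).map (fun pr => (vOf rules pr).count ch)).sum + rest.count ch := by
    calc ((pairsOf (a :: rest)).map (fun pr => (expand rules pr).count ch)).sum
        = ((pairsOf (a :: rest)).map (fun pr =>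
            (vOf rules pr).count ch + ([pr.2] : List Char).count ch)).sum := by
          simp only [hexp]
      _ = ((pairsOf (a :: rest)).map (fun pr => (vOf rules pr).count ch)).sum +
            ((pairsOf (a :: rest)).map (fun pr => ([pr.2] : List Char).count ch)).sum := by
          rw [List.sum_map_add]
      _ = _ := by rw [sum_count_singleton, htail]
  simp [List.count_cons, List.count_flatMap, Function.comp_def, h1]
  omega

theorem count_aStep_pairs (rules : List (String × String)) (a : Char) (rest : List Char)
    (q : Char × Char) :
    (pairsOf (aStep rules (a :: rest))).count q =
      ((pairsOf (a :: rest)).map (fun pr => (expPairs rules pr).count q)).sum := by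
  rw [aStep_eq, pairsOf_chain, List.count_flatMap, Function.comp_def]

theorem foldl_modify_add {α : Type} [BEq α] [LawfulBEq α] [DecidableEq α]
    (l : List α) (n : Int) :
    ∀ (d : PySem.Dict α Int) (x : α),
    (l.foldl (fun d q => d.modify q 0 (· + n)) d).getD x 0 = d.getD x 0 + n * l.count x := by
  induction l with
  | nil => intro d x; simp
  | cons a l ih =>
    intro d x
    rw [List.foldl_cons, ih, PySem.Dict.getD_modify, List.count_cons]
    by_cases h : x = a
    · subst h; simp; ring
    · simp [h]
      exact Or.inl (Ne.symm h)

theorem bFold_spec (rules : List (String × String)) (its : List ((Char × Char) × Int)) :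
    ∀ (acc : PySem.Dict (Char × Char) Int × PySem.Dict Char Int),
    (∀ q, (its.foldl (bBody rules) acc).1.getD q 0 =
        acc.1.getD q 0 + (its.map (fun pn => pn.2 * ((expPairs rules pn.1).count q : Int))).sum) ∧
    (∀ ch, (its.foldl (bBody rules) acc).2.getD ch 0 =
        acc.2.getD ch 0 + (its.map (fun pn => pn.2 * ((vOf rules pn.1).count ch : Int))).sum) ∧
    (∀ q, q ∈ (its.foldl (bBody rules) acc).1.keys ↔
        q ∈ acc.1.keys ∨ ∃ pn ∈ its, q ∈ expPairs rules pn.1) ∧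
    (∀ ch, ch ∈ (its.foldl (bBody rules) acc).2.keys ↔
        ch ∈ acc.2.keys ∨ ∃ pn ∈ its, ch ∈ vOf rules pn.1) ∧
    (acc.1.keys.Nodup → (its.foldl (bBody rules) acc).1.keys.Nodup) ∧
    (acc.2.keys.Nodup → (its.foldl (bBody rules) acc).2.keys.Nodup) := by
  induction its with
  | nil => intro acc; simp
  | cons it its ih =>
    intro acc
    rw [List.foldl_cons]
    obtain ⟨ih1, ih2, ih3, ih4, ih5, ih6⟩ := ih (bBody rules acc it)
    cases hrule : ruleGet? rules (String.mk [it.1.1, it.1.2]) with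
    | none =>
      have hb : bBody rules acc it = (acc.1.modify it.1 0 (· + it.2), acc.2) := by
        simp [bBody, hrule]
      have hexp : expPairs rules it.1 = [it.1] := by
        simp [expPairs, expand, vOf, hrule, pairsOf]
      rw [hb] at ih1 ih2 ih3 ih4 ih5 ih6 ⊢
      refine ⟨?_, ?_, ?_, ?_, ?_, ?_⟩
      · intro q
        rw [ih1 q, PySem.Dict.getD_modify]
        simp only [List.map_cons, List.sum_cons, hexp]
        by_cases h : q = it.1
        · subst h; simp [List.count_cons]; ring
        · simp [List.count_cons, h, Ne.symm h]
      · intro ch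
        rw [ih2 ch]
        simp [hrule, vOf]
      · intro q
        rw [ih3 q]
        rw [PySem.Dict.keys_modify]
        simp only [PySem.Dict.mem_keys_insert, hexp]
        constructor
        · rintro (h | h)
          · rcases h with h | h
            · exact Or.inr ⟨it, by simp, by rw [hexp]; simp [h]⟩
            · exact Or.inl h
          · rcases h with ⟨pn, hpn, hq⟩
            exact Or.inr ⟨pn, by simp [hpn], hq⟩
        · rintro (h | ⟨pn, hpn, hq⟩)
          · exact Or.inl (Or.inr h)
          · rcases List.mem_cons.mp hpn with h | h
            · subst h; rw [hexp] at hq; simp at hq; exact Or.inl (Or.inl hq)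
            · exact Or.inr ⟨pn, h, hq⟩
      · intro ch
        rw [ih4 ch]
        simp [vOf, hrule]
      · intro h
        exact ih5 (by rw [PySem.Dict.keys_modify]; exact PySem.Dict.nodup_keys_insert _ _ _ h)
      · exact ih6
    | some v =>
      have hb : bBody rules acc it =
          (((it.1.1 :: v.toList ++ [it.1.2]).zip ((it.1.1 :: v.toList ++ [it.1.2])).tail).foldl
              (fun d q => d.modify q 0 (· + it.2)) acc.1,
            v.toList.foldl (fun d ch => d.modify ch 0 (· + it.2)) acc.2) := by
        simp [bBody, hrule]
      have hseg : ((it.1.1 :: v.toList ++ [it.1.2]).zip ((it.1.1 :: v.toList ++ [it.1.2])).tail)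
          = expPairs rules it.1 := by
        simp [expPairs, expand, vOf, hrule, pairsOf]
      have hv : vOf rules it.1 = v.toList := by simp [vOf, hrule]
      rw [hseg] at hb
      rw [hb] at ih1 ih2 ih3 ih4 ih5 ih6 ⊢
      refine ⟨?_, ?_, ?_, ?_, ?_, ?_⟩
      · intro q
        rw [ih1 q, foldl_modify_add]
        simp only [List.map_cons, List.sum_cons]
        ring
      · intro ch
        rw [ih2 ch, foldl_modify_add]
        simp only [List.map_cons, List.sum_cons, hv]
        ring
      · intro q
        rw [ih3 q, PySem.Dict.keys_foldl_modify, PySem.Set.mem_update]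
        constructor
        · rintro ((h | h) | h)
          · exact Or.inl h
          · exact Or.inr ⟨it, by simp, h⟩
          · rcases h with ⟨pn, hpn, hq⟩
            exact Or.inr ⟨pn, by simp [hpn], hq⟩
        · rintro (h | ⟨pn, hpn, hq⟩)
          · exact Or.inl (Or.inl h)
          · rcases List.mem_cons.mp hpn with h | h
            · subst h; exact Or.inl (Or.inr hq)
            · exact Or.inr ⟨pn, h, hq⟩
      · intro ch
        rw [ih4 ch, PySem.Dict.keys_foldl_modify, PySem.Set.mem_update]
        constructor
        · rintro ((h | h) | h)
          · exact Or.inl h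
          · exact Or.inr ⟨it, by simp, by rw [hv]; exact h⟩
          · rcases h with ⟨pn, hpn, hq⟩
            exact Or.inr ⟨pn, by simp [hpn], hq⟩
        · rintro (h | ⟨pn, hpn, hq⟩)
          · exact Or.inl (Or.inl h)
          · rcases List.mem_cons.mp hpn with h | h
            · subst h; rw [hv] at hq; exact Or.inl (Or.inr hq)
            · exact Or.inr ⟨pn, h, hq⟩
      · intro h
        refine ih5 ?_
        exact PySem.Dict.nodup_keys_foldl_modify_key _ (fun x => x) 0 (fun _ _ => (· + it.2)) _ h
      · intro h
        refine ih6 ?_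
        exact PySem.Dict.nodup_keys_foldl_modify_key _ (fun x => x) 0 (fun _ _ => (· + it.2)) _ h

theorem cast_sum_map {α : Type} (l : List α) (g : α → Nat) :
    (((l.map g).sum : Nat) : Int) = (l.map (fun x => ((g x : Nat) : Int))).sum := by
  induction l with
  | nil => simp
  | cons a l ih => simp [ih]

theorem sum_ite_single {α : Type} [BEq α] [LawfulBEq α] [DecidableEq α] (K : List α) (f : α → Int) (a : α)
    (hK : K.Nodup) (ha : a ∈ K) :
    (K.map (fun k => if k = a then f k else 0)).sum = f a := by
  induction K with
  | nil => simp at ha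
  | cons b K ih =>
    rw [List.map_cons, List.sum_cons]
    rcases List.nodup_cons.mp hK with ⟨hbK, hKnd⟩
    by_cases h : b = a
    · subst h
      have hz : (K.map (fun k => if k = b then f k else 0)).sum = 0 := by
        apply List.sum_eq_zero
        intro x hx
        rcases List.mem_map.mp hx with ⟨k, hk, rfl⟩
        have hkb : k ≠ b := fun e => hbK (e ▸ hk)
        simp [hkb]
      simp [hz]
    · rw [if_neg h, zero_add]
      rcases List.mem_cons.mp ha with e | hm
      · exact absurd e.symm h
      · exact ih hKnd hm

theorem sum_count_mul {α : Type} [BEq α] [LawfulBEq α] [DecidableEq α] (L K : List α) (f : α → Int)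
    (hK : K.Nodup) (hsub : ∀ x ∈ L, x ∈ K) :
    (K.map (fun k => (L.count k : Int) * f k)).sum = (L.map f).sum := by
  induction L with
  | nil => simp
  | cons a L ih =>
    have h1 : (K.map (fun k => ((a :: L).count k : Int) * f k)).sum =
        (K.map (fun k => (L.count k : Int) * f k)).sum +
          (K.map (fun k => if k = a then f k else 0)).sum := by
      rw [← PySem.List.sum_map_add_int]
      congr 1
      apply List.map_congr_left
      intro k hk
      rw [List.count_cons]
      by_cases h : k = a
      · subst h; simp; ring
      · simp [h, Ne.symm h]
    rw [h1, sum_ite_single K f a hK (hsub a (by simp)), ih (fun x hx => hsub x (by simp [hx]))]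
    simp [add_comm]

theorem sum_nat_pos_iff {α : Type} (l : List α) (g : α → Nat) :
    0 < (l.map g).sum ↔ ∃ x ∈ l, 0 < g x := by
  induction l with
  | nil => simp
  | cons a l ih =>
    simp only [List.map_cons, List.sum_cons, List.mem_cons]
    constructor
    · intro h
      rcases Nat.lt_of_lt_of_le h (le_refl _) with _
      by_cases ha : 0 < g a
      · exact ⟨a, Or.inl rfl, ha⟩
      · have : 0 < (l.map g).sum := by omega
        rcases ih.mp this with ⟨x, hx, hgx⟩
        exact ⟨x, Or.inr hx, hgx⟩
    · rintro ⟨x, hx | hx, hgx⟩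
      · subst hx; omega
      · have := ih.mpr ⟨x, hx, hgx⟩; omega

theorem bStep_inv (rules : List (String × String)) (t : List Char) (ht : t ≠ [])
    (st : PySem.Dict (Char × Char) Int × PySem.Dict Char Int) (h : BInv rules t st) :
    BInv rules (aStep rules t) (bStep rules st) := by
  obtain ⟨a, rest, rfl⟩ : ∃ a rest, t = a :: rest := by
    cases t with
    | nil => exact absurd rfl ht
    | cons a rest => exact ⟨a, rest, rfl⟩
  obtain ⟨h1, h2, h3, h4, h5, h6⟩ := h
  have hb : bStep rules st = st.1.items.foldl (bBody rules) (PySem.Dict.empty, st.2) := rfl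
  have hitems : st.1.items = st.1.keys.map (fun k => (k, st.1.getD k 0)) :=
    PySem.Dict.items_eq_map_keys st.1 h2 0
  obtain ⟨s1, s2, s3, s4, s5, s6⟩ := bFold_spec rules st.1.items (PySem.Dict.empty, st.2)
  rw [← hb] at s1 s2 s3 s4 s5 s6
  have hsum : ∀ (f : (Char × Char) → Nat),
      (st.1.items.map (fun pn => pn.2 * ((f pn.1 : Nat) : Int))).sum =
        ((pairsOf (a :: rest)).map (fun x => ((f x : Nat) : Int))).sum := by
    intro f
    rw [hitems, List.map_map]
    have : ((fun pn : (Char × Char) × Int => pn.2 * ((f pn.1 : Nat) : Int)) ∘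
        (fun k => (k, st.1.getD k 0))) = fun k => ((pairsOf (a :: rest)).count k : Int) *
          ((f k : Nat) : Int) := by
      funext k; simp [h1 k]
    rw [this]
    exact sum_count_mul (pairsOf (a :: rest)) st.1.keys _ h2 (fun x hx => (h3 x).mpr hx)
  have hex : ∀ (P : (Char × Char) → Prop),
      (∃ pn ∈ st.1.items, P pn.1) ↔ (∃ x ∈ pairsOf (a :: rest), P x) := by
    intro P
    rw [hitems]
    constructor
    · rintro ⟨pn, hpn, hP⟩
      rcases List.mem_map.mp hpn with ⟨k, hk, rfl⟩
      exact ⟨k, (h3 k).mp hk, hP⟩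
    · rintro ⟨x, hx, hP⟩
      exact ⟨(x, st.1.getD x 0), List.mem_map.mpr ⟨x, (h3 x).mpr hx, rfl⟩, hP⟩
  refine ⟨?_, ?_, ?_, ?_, ?_, ?_⟩
  · intro q
    rw [s1 q, hsum (fun x => (expPairs rules x).count q)]
    rw [← cast_sum_map, ← count_aStep_pairs]
    simp
  · exact s5 PySem.Dict.nodup_keys_empty
  · intro q
    rw [s3 q, hex (fun x => q ∈ expPairs rules x)]
    rw [PySem.Dict.keys_empty]
    have : q ∈ pairsOf (aStep rules (a :: rest)) ↔
        0 < ((pairsOf (a :: rest)).map (fun x => (expPairs rules x).count q)).sum := by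
      rw [← count_aStep_pairs]
      exact List.count_pos_iff.symm
    rw [sum_nat_pos_iff] at this
    simp only [List.not_mem_nil, false_or]
    rw [this]
    constructor
    · rintro ⟨x, hx, hq⟩; exact ⟨x, hx, List.count_pos_iff.mpr hq⟩
    · rintro ⟨x, hx, hq⟩; exact ⟨x, hx, List.count_pos_iff.mp hq⟩
  · intro ch
    rw [s2 ch, hsum (fun x => (vOf rules x).count ch), h4 ch, ← cast_sum_map,
      count_aStep_char rules a rest ch]
    push_cast
    ring
  · exact s6 h5
  · intro ch
    rw [s4 ch, hex (fun x => ch ∈ vOf rules x), h6 ch]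
    have hcnt : (aStep rules (a :: rest)).count ch =
        (a :: rest).count ch + ((pairsOf (a :: rest)).map (fun pr => (vOf rules pr).count ch)).sum :=
      count_aStep_char rules a rest ch
    constructor
    · rintro (hm | ⟨x, hx, hq⟩)
      · have : 0 < (a :: rest).count ch := List.count_pos_iff.mpr hm
        exact List.count_pos_iff.mp (by omega)
      · have : 0 < ((pairsOf (a :: rest)).map (fun pr => (vOf rules pr).count ch)).sum :=
          (sum_nat_pos_iff _ _).mpr ⟨x, hx, List.count_pos_iff.mpr hq⟩
        exact List.count_pos_iff.mp (by omega)
    · intro hm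
      have : 0 < (aStep rules (a :: rest)).count ch := List.count_pos_iff.mpr hm
      rw [hcnt] at this
      by_cases hin : ch ∈ (a :: rest)
      · exact Or.inl hin
      · have hz : (a :: rest).count ch = 0 := by
          by_contra hnz
          exact hin (List.count_pos_iff.mp (by omega))
        have : 0 < ((pairsOf (a :: rest)).map (fun pr => (vOf rules pr).count ch)).sum := by omega
        rcases (sum_nat_pos_iff _ _).mp this with ⟨x, hx, hq⟩
        exact Or.inr ⟨x, hx, List.count_pos_iff.mp hq⟩

theorem fold_inv (rules : List (String × String)) (L : List Int) :
    ∀ (t : List Char) (st : PySem.Dict (Char × Char) Int × PySem.Dict Char Int),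
    t ≠ [] → BInv rules t st →
    (L.foldl (fun t _ => aStep rules t) t) ≠ [] ∧
      BInv rules (L.foldl (fun t _ => aStep rules t) t) (L.foldl (fun st _ => bStep rules st) st) := by
  induction L with
  | nil => intro t st ht h; exact ⟨ht, h⟩
  | cons x L ih =>
    intro t st ht h
    rw [List.foldl_cons, List.foldl_cons]
    apply ih
    · obtain ⟨a, rest, rfl⟩ : ∃ a rest, t = a :: rest := by
        cases t with
        | nil => exact absurd rfl ht
        | cons a rest => exact ⟨a, rest, rfl⟩
      rw [aStep_eq]
      simp
    · exact bStep_inv rules t ht st h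

theorem max?_congr (l1 l2 : List Int) (h1 : l1 ≠ []) (hm : ∀ v, v ∈ l1 ↔ v ∈ l2) :
    PySem.List.max? l1 (fun x => x) = PySem.List.max? l2 (fun x => x) := by
  obtain ⟨m1, hm1⟩ : ∃ m1, PySem.List.max? l1 (fun x => x) = some m1 := by
    cases e : PySem.List.max? l1 (fun x => x) with
    | none => exact absurd ((PySem.List.max?_eq_none_iff l1 _).mp e) h1
    | some m => exact ⟨m, rfl⟩
  have h2 : l2 ≠ [] := by
    obtain ⟨a, ha⟩ := List.exists_mem_of_ne_nil l1 h1
    exact List.ne_nil_of_mem ((hm a).mp ha)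
  obtain ⟨m2, hm2⟩ : ∃ m2, PySem.List.max? l2 (fun x => x) = some m2 := by
    cases e : PySem.List.max? l2 (fun x => x) with
    | none => exact absurd ((PySem.List.max?_eq_none_iff l2 _).mp e) h2
    | some m => exact ⟨m, rfl⟩
  rw [hm1, hm2]
  have ha : m1 ≤ m2 := PySem.List.max?_isMax hm2 m1 ((hm m1).mp (PySem.List.max?_mem hm1))
  have hb : m2 ≤ m1 := PySem.List.max?_isMax hm1 m2 ((hm m2).mpr (PySem.List.max?_mem hm2))
  exact congrArg some (le_antisymm ha hb)

theorem min?_congr (l1 l2 : List Int) (h1 : l1 ≠ []) (hm : ∀ v, v ∈ l1 ↔ v ∈ l2) :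
    PySem.List.min? l1 (fun x => x) = PySem.List.min? l2 (fun x => x) := by
  obtain ⟨m1, hm1⟩ : ∃ m1, PySem.List.min? l1 (fun x => x) = some m1 := by
    cases e : PySem.List.min? l1 (fun x => x) with
    | none => exact absurd ((PySem.List.min?_eq_none_iff l1 _).mp e) h1
    | some m => exact ⟨m, rfl⟩
  have h2 : l2 ≠ [] := by
    obtain ⟨a, ha⟩ := List.exists_mem_of_ne_nil l1 h1
    exact List.ne_nil_of_mem ((hm a).mp ha)
  obtain ⟨m2, hm2⟩ : ∃ m2, PySem.List.min? l2 (fun x => x) = some m2 := by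
    cases e : PySem.List.min? l2 (fun x => x) with
    | none => exact absurd ((PySem.List.min?_eq_none_iff l2 _).mp e) h2
    | some m => exact ⟨m, rfl⟩
  rw [hm1, hm2]
  have ha : m1 ≤ m2 := PySem.List.min?_isMin hm1 m2 ((hm m2).mpr (PySem.List.min?_mem hm2))
  have hb : m2 ≤ m1 := PySem.List.min?_isMin hm2 m1 ((hm m1).mp (PySem.List.min?_mem hm1))
  exact congrArg some (le_antisymm ha hb)

theorem mem_values (t : List Char) (d : PySem.Dict Char Int)
    (hg : ∀ ch, d.getD ch 0 = (t.count ch : Int)) (hn : d.keys.Nodup)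
    (hk : ∀ ch, ch ∈ d.keys ↔ ch ∈ t) (v : Int) :
    v ∈ d.values ↔ ∃ ch ∈ t, (t.count ch : Int) = v := by
  rw [PySem.Dict.values_eq_map_keys d hn 0]
  constructor
  · intro h
    rcases List.mem_map.mp h with ⟨ch, hch, rfl⟩
    exact ⟨ch, (hk ch).mp hch, (hg ch).symm⟩
  · rintro ⟨ch, hch, rfl⟩
    exact List.mem_map.mpr ⟨ch, (hk ch).mpr hch, hg ch⟩

theorem values_ne_nil (t : List Char) (ht : t ≠ []) (d : PySem.Dict Char Int)
    (hn : d.keys.Nodup) (hk : ∀ ch, ch ∈ d.keys ↔ ch ∈ t) : d.values ≠ [] := by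
  obtain ⟨a, ha⟩ := List.exists_mem_of_ne_nil t ht
  have : a ∈ d.keys := (hk a).mpr ha
  rw [PySem.Dict.values_eq_map_keys d hn 0]
  intro e
  rw [List.map_eq_nil_iff] at e
  rw [e] at this
  simp at this

-- ===== VERDICT (by name: the statement is the Claim_ definition above) =====
theorem apply_insertion_spec : Claim_equal_apply_insertion := by
  intro template rules steps _ hpre
  unfold Spec_apply_insertion
  have ht0 : template.toList ≠ [] := hpre
  have hsl : PySem.List.slice template.toList (some 1) none = template.toList.tail := by
    simp [pysem]
  have init : BInv rules template.toList
      (PySem.Dict.counter (template.toList.zip (PySem.List.slice template.toList (some 1) none)),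
       PySem.Dict.counter template.toList) := by
    rw [hsl]
    refine ⟨?_, PySem.Dict.nodup_keys_counter _, ?_, ?_, PySem.Dict.nodup_keys_counter _, ?_⟩
    · intro q; exact PySem.Dict.getD_counter _ q
    · intro q
      rw [PySem.Dict.keys_counter, PySem.Set.mem_ofList]
      exact Iff.rfl
    · intro ch; exact PySem.Dict.getD_counter _ ch
    · intro ch
      rw [PySem.Dict.keys_counter, PySem.Set.mem_ofList]
  obtain ⟨hne, hfin⟩ := fold_inv rules (PySem.List.pyRange 0 steps 1) template.toList _ ht0 init
  obtain ⟨f1, f2, f3, f4, f5, f6⟩ := hfin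
  have hAg : ∀ ch, (PySem.Dict.counter
      ((PySem.List.pyRange 0 steps 1).foldl (fun t _ => aStep rules t) template.toList)).getD ch 0 =
      (((PySem.List.pyRange 0 steps 1).foldl (fun t _ => aStep rules t) template.toList).count ch : Int) :=
    fun ch => PySem.Dict.getD_counter _ ch
  have hAk : ∀ ch, ch ∈ (PySem.Dict.counter
      ((PySem.List.pyRange 0 steps 1).foldl (fun t _ => aStep rules t) template.toList)).keys ↔
      ch ∈ (PySem.List.pyRange 0 steps 1).foldl (fun t _ => aStep rules t) template.toList := by
    intro ch
    rw [PySem.Dict.keys_counter, PySem.Set.mem_ofList]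
  have hmem : ∀ v, v ∈ (PySem.Dict.counter
      ((PySem.List.pyRange 0 steps 1).foldl (fun t _ => aStep rules t) template.toList)).values ↔
      v ∈ ((PySem.List.pyRange 0 steps 1).foldl (fun st _ => bStep rules st)
        (PySem.Dict.counter (template.toList.zip (PySem.List.slice template.toList (some 1) none)),
         PySem.Dict.counter template.toList)).2.values := by
    intro v
    rw [mem_values _ _ hAg (PySem.Dict.nodup_keys_counter _) hAk v,
      mem_values _ _ f4 f5 f6 v]
  have hAne : (PySem.Dict.counter
      ((PySem.List.pyRange 0 steps 1).foldl (fun t _ => aStep rules t) template.toList)).values ≠ [] :=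
    values_ne_nil _ hne _ (PySem.Dict.nodup_keys_counter _) hAk
  have hmax := max?_congr _ _ hAne hmem
  have hmin := min?_congr _ _ hAne hmem
  simp only [apply_insertion, apply_insertion_alt]
  rw [hmax, hmin]
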